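-- pv_equiv track=rewrite | github.com/symon-ai/tap-salesforce | tap_salesforce/__init__.py | get_replication_key
-- ===== SOURCE A (Python) =====
-- FORCED_FULL_TABLE = {
--     # Does not support ordering by CreatedDate
--     'BackgroundOperationResult',
--     'LoginEvent',
--     'LightningUriEvent',
--     'UriEvent',
--     'LogoutEvent',
--     'ReportEvent',
-- }
--
-- def get_replication_key(sobject_name, fields):
--     if sobject_name in FORCED_FULL_TABLE:
--         return None
--
--     fields_list = [f['name'] for f in fields]
--
--     if 'SystemModstamp' in fields_list:
--         return 'SystemModstamp'
--     elif 'LastModifiedDate' in fields_list: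
--         return 'LastModifiedDate'
--     elif 'CreatedDate' in fields_list:
--         return 'CreatedDate'
--     elif 'LoginTime' in fields_list and sobject_name == 'LoginHistory':
--         return 'LoginTime'
--     return None
-- ===== SOURCE B (Python) =====
-- FORCED_FULL_TABLE = {
--     # Does not support ordering by CreatedDate
--     'BackgroundOperationResult',
--     'LoginEvent',
--     'LightningUriEvent',
--     'UriEvent',
--     'LogoutEvent',
--     'ReportEvent',
-- }
--
-- def get_replication_key(sobject_name, fields):
--     if sobject_name in FORCED_FULL_TABLE:
--         return None
--     rank = {'SystemModstamp': 0, 'LastModifiedDate': 1, 'CreatedDate': 2}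
--     if sobject_name == 'LoginHistory':
--         rank['LoginTime'] = 3
--     best_rank, best = 4, None
--     for f in fields:
--         name = f['name']
--         r = rank.get(name, 4)
--         if r < best_rank:
--             best_rank, best = r, name
--     return best
-- ===== Notes on version B (the rewrite author's own statement) =====
-- stated objective: alternative
-- what changed: Replaced building a full name list plus four sequential membership scans with a single pass over the fields that tracks the minimum of a rank table (SystemModstamp=0, LastModifiedDate=1, CreatedDate=2, LoginTime=3 only for LoginHistory).
import Mathlib
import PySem

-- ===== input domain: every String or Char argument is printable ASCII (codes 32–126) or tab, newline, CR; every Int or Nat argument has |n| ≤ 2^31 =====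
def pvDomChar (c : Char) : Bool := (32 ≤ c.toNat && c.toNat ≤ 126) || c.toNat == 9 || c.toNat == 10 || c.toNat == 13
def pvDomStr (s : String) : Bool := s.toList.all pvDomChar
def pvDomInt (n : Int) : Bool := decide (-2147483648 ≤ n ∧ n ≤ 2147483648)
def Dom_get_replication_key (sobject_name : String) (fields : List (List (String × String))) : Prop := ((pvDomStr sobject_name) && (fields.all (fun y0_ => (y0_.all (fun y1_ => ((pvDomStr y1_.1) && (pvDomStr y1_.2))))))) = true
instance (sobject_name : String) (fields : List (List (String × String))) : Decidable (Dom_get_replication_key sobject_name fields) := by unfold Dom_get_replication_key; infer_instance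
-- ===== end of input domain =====

-- B replaces A's name-list plus four sequential membership scans by a single pass that
-- tracks the minimum of a rank table (alternative decomposition, same cost).

-- module constant FORCED_FULL_TABLE (shared by both Pythons)
def pvFFT : PySem.Set String := PySem.Set.ofList
  ["BackgroundOperationResult", "LoginEvent", "LightningUriEvent", "UriEvent", "LogoutEvent", "ReportEvent"]

-- ===== PORT A =====
-- f['name'] is totalized as Option (none = KeyError); exact under Pre_ (every field has a 'name' key)
def get_replication_key (sobject_name : String) (fields : List (List (String × String))) : Option String :=
  if PySem.Set.contains pvFFT sobject_name then none
  else
    let fields_list : List (Option String) := fields.map (fun f => PySem.Dict.get? (PySem.Dict.mk f) "name")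
    if some "SystemModstamp" ∈ fields_list then some "SystemModstamp"
    else if some "LastModifiedDate" ∈ fields_list then some "LastModifiedDate"
    else if some "CreatedDate" ∈ fields_list then some "CreatedDate"
    else if some "LoginTime" ∈ fields_list ∧ sobject_name = "LoginHistory" then some "LoginTime"
    else none

-- ===== PORT B =====
-- single pass keeping (best_rank, best); f['name'] totalized as Option as in port A (exact under Pre_)
def get_replication_key_alt (sobject_name : String) (fields : List (List (String × String))) : Option String :=
  if PySem.Set.contains pvFFT sobject_name then none
  else
    let rank0 : PySem.Dict String Int :=
      ((PySem.Dict.empty.insert "SystemModstamp" 0).insert "LastModifiedDate" 1).insert "CreatedDate" 2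
    let rank := if sobject_name = "LoginHistory" then rank0.insert "LoginTime" 3 else rank0
    let st := fields.foldl (fun (st : Int × Option String) f =>
        let name := PySem.Dict.get? (PySem.Dict.mk f) "name"
        let r : Int := match name with
          | some n => rank.getD n 4
          | none => 4
        if r < st.1 then (r, name) else st) ((4 : Int), (none : Option String))
    st.2

-- ===== PRECONDITION & SPEC =====
-- Pre_ excludes exactly the inputs where Python A raises KeyError: a field dict without a
-- 'name' key — except when sobject_name is in FORCED_FULL_TABLE, where A returns before
-- touching the fields.
def Pre_get_replication_key (sobject_name : String) (fields : List (List (String × String))) : Prop :=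
  PySem.Set.contains pvFFT sobject_name = true ∨
    ∀ f ∈ fields, (PySem.Dict.get? (PySem.Dict.mk f) "name").isSome = true
instance (sobject_name : String) (fields : List (List (String × String))) : Decidable (Pre_get_replication_key sobject_name fields) := by unfold Pre_get_replication_key; infer_instance

def pvWitness_get_replication_key : String × (List (List (String × String))) :=
  ("LoginHistory", [[("name", "LoginTime")], [("name", "Id"), ("type", "string")]])

def Spec_get_replication_key (sobject_name : String) (fields : List (List (String × String))) (out : Option String) : Prop := out = get_replication_key_alt sobject_name fields
instance (sobject_name : String) (fields : List (List (String × String))) (out : Option String) : Decidable (Spec_get_replication_key sobject_name fields out) := by unfold Spec_get_replication_key; infer_instance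

-- ===== CLAIM (what is proved, stated in full; the proofs are below) =====
def Claim_equal_get_replication_key : Prop := ∀ (sobject_name : String) (fields : List (List (String × String))), Dom_get_replication_key sobject_name fields → Pre_get_replication_key sobject_name fields → Spec_get_replication_key sobject_name fields (get_replication_key sobject_name fields)

-- ===== LEMMAS AND PROOFS =====

-- rank of a name, as B's dict computes it (lookup order of the nested inserts)
def rkf (lh : Bool) (n : String) : Int :=
  if lh = true ∧ n = "LoginTime" then 3
  else if n = "CreatedDate" then 2
  else if n = "LastModifiedDate" then 1
  else if n = "SystemModstamp" then 0
  else 4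

-- the (unique) replication-key name of a rank
def nmOf (r : Int) : Option String :=
  if r = 0 then some "SystemModstamp"
  else if r = 1 then some "LastModifiedDate"
  else if r = 2 then some "CreatedDate"
  else if r = 3 then some "LoginTime"
  else none

def Fm (lh : Bool) (r : Int) (ns : List String) : Int := ns.foldl (fun r n => min r (rkf lh n)) r

def pvNames (fields : List (List (String × String))) : List String :=
  fields.filterMap (fun f => PySem.Dict.get? (PySem.Dict.mk f) "name")

lemma rkf_bounds (lh : Bool) (n : String) : 0 ≤ rkf lh n ∧ rkf lh n ≤ 4 := by
  unfold rkf; split_ifs <;> norm_num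

lemma rkf_nm (lh : Bool) (n : String) (h : rkf lh n < 4) : nmOf (rkf lh n) = some n := by
  unfold rkf at *; unfold nmOf
  split_ifs at * <;> simp_all

lemma rkf_le0 (lh : Bool) (n : String) : rkf lh n ≤ 0 ↔ n = "SystemModstamp" := by
  unfold rkf; split_ifs <;> simp_all

lemma rkf_le1 (lh : Bool) (n : String) : rkf lh n ≤ 1 ↔ n = "SystemModstamp" ∨ n = "LastModifiedDate" := by
  unfold rkf; split_ifs <;> simp_all

lemma rkf_le2 (lh : Bool) (n : String) :
    rkf lh n ≤ 2 ↔ n = "SystemModstamp" ∨ n = "LastModifiedDate" ∨ n = "CreatedDate" := by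
  unfold rkf; split_ifs <;> simp_all

lemma rkf_le3 (lh : Bool) (n : String) :
    rkf lh n ≤ 3 ↔ n = "SystemModstamp" ∨ n = "LastModifiedDate" ∨ n = "CreatedDate" ∨ (lh = true ∧ n = "LoginTime") := by
  unfold rkf; split_ifs <;> simp_all

lemma Fm_bounds (lh : Bool) : ∀ (ns : List String) (r : Int), 0 ≤ r → r ≤ 4 → 0 ≤ Fm lh r ns ∧ Fm lh r ns ≤ 4 := by
  intro ns
  induction ns with
  | nil => intro r h0 h4; exact ⟨h0, h4⟩
  | cons n ns ih =>
    intro r h0 h4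
    have hb := rkf_bounds lh n
    exact ih (min r (rkf lh n)) (by omega) (by omega)

lemma Fm_min (lh : Bool) : ∀ (ns : List String) (r : Int), 0 ≤ r → r ≤ 4 → Fm lh r ns = min r (Fm lh 4 ns) := by
  intro ns
  induction ns with
  | nil => intro r h0 h4; simp only [Fm, List.foldl_nil]; omega
  | cons n ns ih =>
    intro r h0 h4
    have hb := rkf_bounds lh n
    have h1 : Fm lh r (n :: ns) = Fm lh (min r (rkf lh n)) ns := rfl
    have h2 : Fm lh 4 (n :: ns) = Fm lh (min 4 (rkf lh n)) ns := rfl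
    rw [h1, h2, ih (min r (rkf lh n)) (by omega) (by omega),
        ih (min 4 (rkf lh n)) (by omega) (by omega)]
    omega

lemma Fm_cons (lh : Bool) (n : String) (ns : List String) :
    Fm lh 4 (n :: ns) = min (rkf lh n) (Fm lh 4 ns) := by
  have hb := rkf_bounds lh n
  have h2 : Fm lh 4 (n :: ns) = Fm lh (min 4 (rkf lh n)) ns := rfl
  rw [h2, Fm_min lh ns (min 4 (rkf lh n)) (by omega) (by omega)]
  omega

lemma Fm_le (lh : Bool) : ∀ (ns : List String) (k : Int), k < 4 →
    (Fm lh 4 ns ≤ k ↔ ∃ n ∈ ns, rkf lh n ≤ k) := by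
  intro ns
  induction ns with
  | nil =>
    intro k hk
    simp only [Fm, List.foldl_nil]
    constructor
    · intro h; omega
    · rintro ⟨m, hm, _⟩; simp at hm
  | cons n ns ih =>
    intro k hk
    rw [Fm_cons, min_le_iff, ih k hk]
    constructor
    · rintro (h | ⟨m, hm, hr⟩)
      · exact ⟨n, List.mem_cons_self .., h⟩
      · exact ⟨m, List.mem_cons_of_mem _ hm, hr⟩
    · rintro ⟨m, hm, hr⟩
      rcases List.mem_cons.1 hm with rfl | hm'
      · exact Or.inl hr
      · exact Or.inr ⟨m, hm', hr⟩

-- A's if-chain equals the name of the minimal rank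
lemma chain_eq (lh : Bool) (ns : List String) :
    (if "SystemModstamp" ∈ ns then some "SystemModstamp"
     else if "LastModifiedDate" ∈ ns then some "LastModifiedDate"
     else if "CreatedDate" ∈ ns then some "CreatedDate"
     else if "LoginTime" ∈ ns ∧ lh = true then some "LoginTime"
     else none) = nmOf (Fm lh 4 ns) := by
  have hSM : "SystemModstamp" ∈ ns ↔ Fm lh 4 ns ≤ 0 := by
    rw [Fm_le lh ns 0 (by norm_num)]
    constructor
    · intro h; exact ⟨_, h, by rw [rkf_le0]⟩
    · rintro ⟨m, hm, hr⟩; rw [rkf_le0] at hr; exact hr ▸ hm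
  have hLMD : "LastModifiedDate" ∈ ns → Fm lh 4 ns ≤ 1 := by
    intro h; rw [Fm_le lh ns 1 (by norm_num)]
    exact ⟨_, h, by rw [rkf_le1]; right; rfl⟩
  have hCD : "CreatedDate" ∈ ns → Fm lh 4 ns ≤ 2 := by
    intro h; rw [Fm_le lh ns 2 (by norm_num)]
    exact ⟨_, h, by rw [rkf_le2]; right; right; rfl⟩
  have hLT : "LoginTime" ∈ ns ∧ lh = true → Fm lh 4 ns ≤ 3 := by
    rintro ⟨h, hl⟩; rw [Fm_le lh ns 3 (by norm_num)]
    exact ⟨_, h, by rw [rkf_le3]; right; right; right; exact ⟨hl, rfl⟩⟩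
  obtain ⟨hb0, hb4⟩ := Fm_bounds lh ns 4 (by norm_num) (by norm_num)
  set m := Fm lh 4 ns with hm
  interval_cases m
  · -- m = 0
    have : "SystemModstamp" ∈ ns := hSM.2 (by omega)
    simp [this, nmOf]
  · -- m = 1
    have h0 : "SystemModstamp" ∉ ns := fun h => by have := hSM.1 h; omega
    have h1 : "LastModifiedDate" ∈ ns := by
      have : Fm lh 4 ns ≤ 1 := by omega
      rw [Fm_le lh ns 1 (by norm_num)] at this
      obtain ⟨a, ha, hr⟩ := this
      rw [rkf_le1] at hr
      rcases hr with rfl | rfl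
      · exact absurd ha h0
      · exact ha
    simp [h0, h1, nmOf]
  · -- m = 2
    have h0 : "SystemModstamp" ∉ ns := fun h => by have := hSM.1 h; omega
    have h1 : "LastModifiedDate" ∉ ns := fun h => by have := hLMD h; omega
    have h2 : "CreatedDate" ∈ ns := by
      have : Fm lh 4 ns ≤ 2 := by omega
      rw [Fm_le lh ns 2 (by norm_num)] at this
      obtain ⟨a, ha, hr⟩ := this
      rw [rkf_le2] at hr
      rcases hr with rfl | rfl | rfl
      · exact absurd ha h0
      · exact absurd ha h1
      · exact ha
    simp [h0, h1, h2, nmOf]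
  · -- m = 3
    have h0 : "SystemModstamp" ∉ ns := fun h => by have := hSM.1 h; omega
    have h1 : "LastModifiedDate" ∉ ns := fun h => by have := hLMD h; omega
    have h2 : "CreatedDate" ∉ ns := fun h => by have := hCD h; omega
    have h3 : "LoginTime" ∈ ns ∧ lh = true := by
      have : Fm lh 4 ns ≤ 3 := by omega
      rw [Fm_le lh ns 3 (by norm_num)] at this
      obtain ⟨a, ha, hr⟩ := this
      rw [rkf_le3] at hr
      rcases hr with rfl | rfl | rfl | ⟨hl, rfl⟩
      · exact absurd ha h0
      · exact absurd ha h1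
      · exact absurd ha h2
      · exact ⟨ha, hl⟩
    simp [h0, h1, h2, h3.1, h3.2, nmOf]
  · -- m = 4
    have h0 : "SystemModstamp" ∉ ns := fun h => by have := hSM.1 h; omega
    have h1 : "LastModifiedDate" ∉ ns := fun h => by have := hLMD h; omega
    have h2 : "CreatedDate" ∉ ns := fun h => by have := hCD h; omega
    have h3 : ¬ ("LoginTime" ∈ ns ∧ lh = true) := fun h => by have := hLT h; omega
    simp [h0, h1, h2, h3, nmOf]

-- B's fold over the fields computes (min rank, its name)
lemma foldB_eq (D : PySem.Dict String Int) (lh : Bool) (hD : ∀ n, D.getD n 4 = rkf lh n) :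
    ∀ (fields : List (List (String × String))),
      (∀ f ∈ fields, (PySem.Dict.get? (PySem.Dict.mk f) "name").isSome = true) →
      ∀ r : Int, 0 ≤ r → r ≤ 4 →
      fields.foldl (fun (st : Int × Option String) f =>
          if (match PySem.Dict.get? (PySem.Dict.mk f) "name" with
              | some n => D.getD n 4
              | none => (4 : Int)) < st.1 then
            ((match PySem.Dict.get? (PySem.Dict.mk f) "name" with
              | some n => D.getD n 4
              | none => (4 : Int)), PySem.Dict.get? (PySem.Dict.mk f) "name")
          else st) (r, nmOf r)
        = (Fm lh r (pvNames fields), nmOf (Fm lh r (pvNames fields))) := by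
  intro fields
  induction fields with
  | nil => intro _ r h0 h4; simp [Fm, pvNames]
  | cons f fs ih =>
    intro hpre r h0 h4
    obtain ⟨n, hn⟩ := Option.isSome_iff_exists.1 (hpre f (List.mem_cons_self ..))
    have hns : pvNames (f :: fs) = n :: pvNames fs := by
      simp [pvNames, hn]
    have hpre' : ∀ g ∈ fs, (PySem.Dict.get? (PySem.Dict.mk g) "name").isSome = true :=
      fun g hg => hpre g (List.mem_cons_of_mem _ hg)
    have hb := rkf_bounds lh n
    rw [List.foldl_cons, hns]
    simp only [hn]
    rw [hD n]
    have hFm : Fm lh r (n :: pvNames fs) = Fm lh (min r (rkf lh n)) (pvNames fs) := rfl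
    split_ifs with hlt
    · have hmin : min r (rkf lh n) = rkf lh n := by omega
      have hname : some n = nmOf (rkf lh n) := (rkf_nm lh n (by omega)).symm
      rw [hFm, hmin, hname, ih hpre' (rkf lh n) (by omega) (by omega)]
    · have hmin : min r (rkf lh n) = r := by omega
      rw [hFm, hmin, ih hpre' r h0 h4]

lemma map_names (fields : List (List (String × String)))
    (hpre : ∀ f ∈ fields, (PySem.Dict.get? (PySem.Dict.mk f) "name").isSome = true) :
    fields.map (fun f => PySem.Dict.get? (PySem.Dict.mk f) "name") = (pvNames fields).map some := by
  induction fields with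
  | nil => simp [pvNames]
  | cons f fs ih =>
    obtain ⟨n, hn⟩ := Option.isSome_iff_exists.1 (hpre f (List.mem_cons_self ..))
    have ih' := ih (fun g hg => hpre g (List.mem_cons_of_mem _ hg))
    simp [pvNames, hn] at ih' ⊢
    exact ih'

lemma getD_rank_false (n : String) :
    (((PySem.Dict.empty.insert "SystemModstamp" (0 : Int)).insert "LastModifiedDate" 1).insert "CreatedDate" 2).getD n 4
      = rkf false n := by
  simp only [PySem.Dict.getD_insert, PySem.Dict.getD_empty, rkf]
  split_ifs <;> simp_all

lemma getD_rank_true (n : String) :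
    ((((PySem.Dict.empty.insert "SystemModstamp" (0 : Int)).insert "LastModifiedDate" 1).insert "CreatedDate" 2).insert "LoginTime" 3).getD n 4
      = rkf true n := by
  simp only [PySem.Dict.getD_insert, PySem.Dict.getD_empty, rkf]
  split_ifs <;> simp_all

-- ===== VERDICT (by name: the statement is the Claim_ definition above) =====
theorem get_replication_key_spec : Claim_equal_get_replication_key := by
  intro sobject_name fields _hdom hpre
  unfold Spec_get_replication_key get_replication_key get_replication_key_alt
  by_cases hg : PySem.Set.contains pvFFT sobject_name = true
  · rw [if_pos hg, if_pos hg]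
  · have hpre' : ∀ f ∈ fields, (PySem.Dict.get? (PySem.Dict.mk f) "name").isSome = true := by
      rcases hpre with h | h
      · exact absurd h hg
      · exact h
    rw [if_neg hg, if_neg hg]
    rw [map_names fields hpre']
    by_cases hlh : sobject_name = "LoginHistory"
    · simp only [hlh, if_true]
      rw [show ((4 : Int), (none : Option String)) = ((4 : Int), nmOf 4) from by simp [nmOf]]
      rw [foldB_eq _ true getD_rank_true fields hpre' 4 (by norm_num) (by norm_num)]
      have hc := chain_eq true (pvNames fields)
      simp only [List.mem_map, Option.some.injEq, exists_eq_right, and_true] at hc ⊢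
      simpa using hc
    · simp only [if_neg hlh]
      rw [show ((4 : Int), (none : Option String)) = ((4 : Int), nmOf 4) from by simp [nmOf]]
      rw [foldB_eq _ false getD_rank_false fields hpre' 4 (by norm_num) (by norm_num)]
      have hc := chain_eq false (pvNames fields)
      simp only [List.mem_map, Option.some.injEq, exists_eq_right] at hc ⊢
      simpa [hlh] using hc
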